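-- pv_equiv track=rewrite | github.com/cryndoc/polisade-orchestrator | scripts/pdlc_doctor.py | _scan_counter_artifact_index
-- ===== SOURCE A (Python) =====
-- _COUNTER_KNOWN_TYPES = [
--     "PRD", "SPEC", "PLAN", "TASK", "FEAT", "BUG",
--     "DEBT", "ADR", "CHORE", "SPIKE", "DESIGN",
-- ]
--
-- def _scan_counter_artifact_index(state):
--     """Return {T: max_id_int} from keys of state.artifactIndex / artifacts."""
--     result = {T: 0 for T in _COUNTER_KNOWN_TYPES}
--     index = state.get("artifactIndex", None)
--     if not isinstance(index, dict) or not index: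
--         index = state.get("artifacts", {})
--         if not isinstance(index, dict):
--             return result
--     for key in index.keys():
--         parts = key.split("-")
--         if len(parts) < 2 or not parts[1].isdigit():
--             continue
--         T = parts[0]
--         if T not in result:
--             continue
--         n = int(parts[1])
--         if n > result[T]:
--             result[T] = n
--     return result
-- ===== SOURCE B (Python) =====
-- _COUNTER_KNOWN_TYPES = [
--     "PRD", "SPEC", "PLAN", "TASK", "FEAT", "BUG",
--     "DEBT", "ADR", "CHORE", "SPIKE", "DESIGN",
-- ]
--
--
-- def _best(T, keys):
--     """Largest id among keys of the form '<T>-<digits>...' (0 if none)."""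
--     best = 0
--     for key in keys:
--         parts = key.split("-")
--         if len(parts) >= 2 and parts[0] == T and parts[1].isdigit():
--             best = max(best, int(parts[1]))
--     return best
--
--
-- def _scan_counter_artifact_index(state):
--     """Return {T: max_id_int} from keys of state.artifactIndex / artifacts."""
--     index = state.get("artifactIndex", None)
--     if not isinstance(index, dict) or not index:
--         index = state.get("artifacts", {})
--         if not isinstance(index, dict):
--             return {T: 0 for T in _COUNTER_KNOWN_TYPES}
--     keys = list(index)
--     return {T: _best(T, keys) for T in _COUNTER_KNOWN_TYPES}
-- ===== Notes on version B (the rewrite author's own statement) =====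
-- stated objective: alternative
-- what changed: Replaces A's single pass that mutates a running-max dict keyed by type with a transposed decomposition: the selected index's keys are listed once, then the result dict is built directly by one independent per-type maximum scan (_best) for each of the eleven known types, with no dict mutation at all.
import Mathlib
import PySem

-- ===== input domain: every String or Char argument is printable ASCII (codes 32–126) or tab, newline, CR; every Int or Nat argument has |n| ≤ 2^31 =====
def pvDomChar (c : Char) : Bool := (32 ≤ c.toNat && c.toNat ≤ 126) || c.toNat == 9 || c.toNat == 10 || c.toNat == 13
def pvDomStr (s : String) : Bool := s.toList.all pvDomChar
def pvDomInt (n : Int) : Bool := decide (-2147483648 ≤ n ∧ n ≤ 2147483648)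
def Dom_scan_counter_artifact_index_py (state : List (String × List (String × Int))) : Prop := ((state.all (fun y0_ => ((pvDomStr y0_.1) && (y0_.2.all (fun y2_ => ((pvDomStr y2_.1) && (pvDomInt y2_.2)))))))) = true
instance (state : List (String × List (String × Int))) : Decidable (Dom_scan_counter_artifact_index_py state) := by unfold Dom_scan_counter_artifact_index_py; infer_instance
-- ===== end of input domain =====

-- B replaces A's running-max dict mutation with an independent per-type maximum scan (alternative
-- decomposition, same asymptotic cost). Equivalence of the RETURN value is proved on all of Dom.

-- ===== PORT A =====
def pvKnownTypes : List String :=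
  ["PRD", "SPEC", "PLAN", "TASK", "FEAT", "BUG", "DEBT", "ADR", "CHORE", "SPIKE", "DESIGN"]

-- shared by both ports because the Python index-selection code is identical in A and B;
-- 'isinstance(index, dict)' is always true under the type convention (state's values are dicts),
-- so the isinstance branches reduce to the None / empty checks.
def pvSelectIndex (state : List (String × List (String × Int))) : List (String × Int) :=
  match (PySem.Dict.mk state).get? "artifactIndex" with
  | some idx => if idx.isEmpty then (PySem.Dict.mk state).getD "artifacts" [] else idx
  | none => (PySem.Dict.mk state).getD "artifacts" []

-- key.split("-"): the separator "-" is a nonempty literal, so split? is always some (exact)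
def pvParts (key : String) : List String := (PySem.Str.split? key "-").getD []

-- loop body of A after parts = key.split("-"): one key's update of the running-max dict
def pvStepACore (result : PySem.Dict String Int) (parts : List String) : PySem.Dict String Int :=
  if parts.length < 2 || !(PySem.Str.strIsdigit (parts.getD 1 "")) then result
  else
    let T := parts.getD 0 ""
    if !(result.contains T) then result
    else
      -- parts[1].isdigit() guarantees int(parts[1]) succeeds, so the .getD 0 default is never used
      let n := (PySem.Int.ofStr? (parts.getD 1 "")).getD 0
      if n > result.getD T 0 then result.insert T n else result

def pvStepA (result : PySem.Dict String Int) (key : String) : PySem.Dict String Int :=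
  pvStepACore result (pvParts key)

def scan_counter_artifact_index_py (state : List (String × List (String × Int))) : List (String × Int) :=
  let result := pvKnownTypes.foldl (fun d T => d.insert T 0) PySem.Dict.empty
  let index := pvSelectIndex state
  ((index.map Prod.fst).foldl pvStepA result).items

-- ===== PORT B =====
-- loop body of B's _best after parts = key.split("-")
def pvBStepCore (T : String) (best : Int) (parts : List String) : Int :=
  if decide (2 ≤ parts.length) && (parts.getD 0 "" == T) && PySem.Str.strIsdigit (parts.getD 1 "")
  then max best ((PySem.Int.ofStr? (parts.getD 1 "")).getD 0)
  else best

def pvBStep (T : String) (best : Int) (key : String) : Int :=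
  pvBStepCore T best (pvParts key)

def pvBest (T : String) (keys : List String) : Int :=
  keys.foldl (pvBStep T) 0

-- the dict comprehension {T: _best(T, keys) for T in _COUNTER_KNOWN_TYPES}: the keys are distinct
-- literals, so the built dict's items are exactly the list in comprehension order (exact).
def scan_counter_artifact_index_py_alt (state : List (String × List (String × Int))) : List (String × Int) :=
  let keys := (pvSelectIndex state).map Prod.fst
  pvKnownTypes.map (fun T => (T, pvBest T keys))

-- ===== PRECONDITION & SPEC =====
def Spec_scan_counter_artifact_index_py (state : List (String × List (String × Int))) (out : List (String × Int)) : Prop := out = scan_counter_artifact_index_py_alt state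
instance (state : List (String × List (String × Int))) (out : List (String × Int)) : Decidable (Spec_scan_counter_artifact_index_py state out) := by unfold Spec_scan_counter_artifact_index_py; infer_instance

-- ===== CLAIM (what is proved, stated in full; the proofs are below) =====
def Claim_equal_scan_counter_artifact_index_py : Prop := ∀ (state : List (String × List (String × Int))), Dom_scan_counter_artifact_index_py state → Spec_scan_counter_artifact_index_py state (scan_counter_artifact_index_py state)

-- ===== LEMMAS AND PROOFS =====

theorem pv_contains_mk_map (l : List String) (f : String → Int) (T : String) :
    (PySem.Dict.mk (l.map (fun t => (t, f t)))).contains T = decide (T ∈ l) := by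
  rw [PySem.Dict.contains_eq_decide_mem_keys]
  simp [PySem.Dict.keys]

theorem pv_getD_mk_map (l : List String) (f : String → Int) (T : String) (h : T ∈ l) :
    (PySem.Dict.mk (l.map (fun t => (t, f t)))).getD T 0 = f T := by
  induction l with
  | nil => cases h
  | cons a l ih =>
    rw [PySem.Dict.getD_eq_get?_getD]
    simp only [List.map_cons, PySem.Dict.get?_mk_cons]
    by_cases ha : a = T
    · simp [ha]
    · rw [if_neg (by simp [ha]), ← PySem.Dict.getD_eq_get?_getD]
      exact ih (by cases h with | head => exact absurd rfl ha | tail _ h => exact h)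

theorem pv_insert_mk_map (l : List String) (f : String → Int) (T : String) (n : Int) (h : T ∈ l) :
    (PySem.Dict.mk (l.map (fun t => (t, f t)))).insert T n
      = PySem.Dict.mk (l.map (fun t => (t, if t = T then n else f t))) := by
  apply PySem.Dict.ext
  rw [PySem.Dict.items_insert_of_contains _ _ (by rw [pv_contains_mk_map]; simpa)]
  simp only [List.map_map]
  refine List.map_congr_left (fun t _ => ?_)
  by_cases ht : t = T <;> simp [ht]

-- the B-condition is false when the parts fail A's guards or name a type ≠ t
theorem pv_bstep_skip (parts : List String) (b : Int) (t : String)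
    (h : ¬ (2 ≤ parts.length ∧ parts.getD 0 "" = t ∧ PySem.Str.strIsdigit (parts.getD 1 "") = true)) :
    pvBStepCore t b parts = b := by
  unfold pvBStepCore
  rw [if_neg]
  simp only [Bool.and_eq_true, decide_eq_true_eq, beq_iff_eq]
  exact fun ⟨⟨h1, h2⟩, h3⟩ => h ⟨h1, h2, h3⟩

theorem pv_bstep_hit (parts : List String) (b : Int) (t : String)
    (h1 : 2 ≤ parts.length) (h2 : parts.getD 0 "" = t)
    (h3 : PySem.Str.strIsdigit (parts.getD 1 "") = true) :
    pvBStepCore t b parts = max b ((PySem.Int.ofStr? (parts.getD 1 "")).getD 0) := by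
  unfold pvBStepCore
  rw [if_pos]
  simp only [Bool.and_eq_true, decide_eq_true_eq, beq_iff_eq]
  exact ⟨⟨h1, h2⟩, h3⟩

theorem pv_step_core (parts : List String) (f : String → Int) :
    pvStepACore (PySem.Dict.mk (pvKnownTypes.map (fun t => (t, f t)))) parts
      = PySem.Dict.mk (pvKnownTypes.map (fun t => (t, pvBStepCore t (f t) parts))) := by
  unfold pvStepACore
  by_cases h1 : parts.length < 2
  · rw [if_pos (by rw [decide_eq_true h1]; rfl)]
    exact congrArg PySem.Dict.mk (List.map_congr_left (fun t _ => by
      rw [pv_bstep_skip parts (f t) t (fun ⟨hle, _⟩ => by omega)]))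
  · by_cases h2 : PySem.Str.strIsdigit (parts.getD 1 "") = true
    · rw [if_neg (by rw [decide_eq_false h1, h2]; simp)]
      dsimp only []
      by_cases hmem : (parts.getD 0 "") ∈ pvKnownTypes
      · have hc : (PySem.Dict.mk (pvKnownTypes.map (fun t => (t, f t)))).contains
            (parts.getD 0 "") = true := by
          rw [pv_contains_mk_map]; exact decide_eq_true hmem
        rw [hc, if_neg (by simp), pv_getD_mk_map _ _ _ hmem]
        by_cases hgt : (PySem.Int.ofStr? (parts.getD 1 "")).getD 0 > f (parts.getD 0 "")
        · rw [if_pos hgt, pv_insert_mk_map _ _ _ _ hmem]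
          refine congrArg PySem.Dict.mk (List.map_congr_left (fun t _ => ?_))
          by_cases ht : t = parts.getD 0 ""
          · rw [if_pos ht, pv_bstep_hit parts (f t) t (by omega) ht.symm h2,
                max_eq_right (le_of_lt (by rw [ht]; exact hgt))]
          · rw [if_neg ht, pv_bstep_skip parts (f t) t (fun ⟨_, heq, _⟩ => ht heq.symm)]
        · rw [if_neg hgt]
          refine congrArg PySem.Dict.mk (List.map_congr_left (fun t _ => ?_))
          by_cases ht : t = parts.getD 0 ""
          · rw [pv_bstep_hit parts (f t) t (by omega) ht.symm h2,
                max_eq_left (by rw [ht]; exact not_lt.mp hgt)]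
          · rw [pv_bstep_skip parts (f t) t (fun ⟨_, heq, _⟩ => ht heq.symm)]
      · have hc : (PySem.Dict.mk (pvKnownTypes.map (fun t => (t, f t)))).contains
            (parts.getD 0 "") = false := by
          rw [pv_contains_mk_map]; exact decide_eq_false hmem
        rw [hc, if_pos (by simp)]
        refine congrArg PySem.Dict.mk (List.map_congr_left (fun t ht => ?_))
        rw [pv_bstep_skip parts (f t) t (fun ⟨_, heq, _⟩ => hmem (heq ▸ ht))]
    · have h2' : PySem.Str.strIsdigit (parts.getD 1 "") = false := Bool.eq_false_iff.mpr h2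
      rw [if_pos (by rw [h2']; simp)]
      exact congrArg PySem.Dict.mk (List.map_congr_left (fun t _ => by
        rw [pv_bstep_skip parts (f t) t (fun ⟨_, _, hd⟩ => h2 hd)]))

theorem pv_init_eq :
    List.foldl (fun (d : PySem.Dict String Int) T => d.insert T 0) PySem.Dict.empty pvKnownTypes
      = PySem.Dict.mk (pvKnownTypes.map (fun t => (t, (0 : Int)))) := by
  decide

theorem pv_fold_eq (keys : List String) (f : String → Int) :
    keys.foldl pvStepA (PySem.Dict.mk (pvKnownTypes.map (fun t => (t, f t))))
      = PySem.Dict.mk (pvKnownTypes.map (fun t => (t, keys.foldl (pvBStep t) (f t)))) := by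
  induction keys generalizing f with
  | nil => rfl
  | cons k ks ih =>
    rw [List.foldl_cons]
    show ks.foldl pvStepA (pvStepACore _ (pvParts k)) = _
    rw [pv_step_core (pvParts k) f, ih (fun t => pvBStepCore t (f t) (pvParts k))]
    rfl

-- ===== VERDICT (by name: the statement is the Claim_ definition above) =====
theorem scan_counter_artifact_index_py_spec : Claim_equal_scan_counter_artifact_index_py := by
  intro state _
  unfold Spec_scan_counter_artifact_index_py
  unfold scan_counter_artifact_index_py scan_counter_artifact_index_py_alt
  dsimp only []
  rw [pv_init_eq, pv_fold_eq ((pvSelectIndex state).map Prod.fst) (fun _ => 0)]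
  rfl
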